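-- pv_equiv track=rewrite | github.com/Esakkiraja2004/hackerRankExercice | Strings/camelCase.py | split_by_uppercase
-- ===== SOURCE A (Python) =====
-- def split_by_uppercase(s):
--     result = []
--     start = 0
--
--     for i in range(1, len(s)):
--         if s[i].isupper():
--             result.append(s[start:i])
--             start = i
--
--     result.append(s[start:])
--     return len(result)
-- ===== SOURCE B (Python) =====
-- def split_by_uppercase(s):
--     return 1 + sum(1 for c in s[1:] if c.isupper())
-- ===== Notes on version B (the rewrite author's own statement) =====
-- stated objective: simpler
-- what changed: B keeps no list of substrings: it just counts uppercase characters past index 0 and adds 1, instead of accumulating slices and measuring the list's length.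
import Mathlib
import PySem

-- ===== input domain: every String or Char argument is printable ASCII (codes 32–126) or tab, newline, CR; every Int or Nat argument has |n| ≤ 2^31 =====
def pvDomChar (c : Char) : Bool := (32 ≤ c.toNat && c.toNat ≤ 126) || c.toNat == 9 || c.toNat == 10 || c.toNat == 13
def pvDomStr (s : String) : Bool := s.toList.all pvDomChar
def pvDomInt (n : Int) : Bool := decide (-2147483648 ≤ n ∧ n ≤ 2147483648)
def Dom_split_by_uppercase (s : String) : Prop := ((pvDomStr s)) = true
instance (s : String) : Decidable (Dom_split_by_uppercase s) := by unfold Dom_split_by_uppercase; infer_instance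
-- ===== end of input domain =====

-- B counts uppercase characters past index 0 and adds 1, instead of accumulating substring slices and measuring the list's length (simpler).


-- ===== PORT A =====
def split_by_uppercase (s : String) : Int :=
  let cs := s.toList
  let st := (PySem.List.pyRange 1 (PySem.Str.len s) 1).foldl
    (fun (st : List (List Char) × Int) i =>
      if PySem.Chars.isupper (PySem.List.pyGetD cs i ' ')
      then (st.1 ++ [PySem.List.slice cs (some st.2) (some i)], i)
      else st)
    (([] : List (List Char)), (0 : Int))
  (((st.1 ++ [PySem.List.slice cs (some st.2) none]).length : Nat) : Int)

-- ===== PORT B =====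
def split_by_uppercase_alt (s : String) : Int :=
  1 + ((s.toList.drop 1).countP PySem.Chars.isupper : Int)

-- ===== PRECONDITION & SPEC =====
def Spec_split_by_uppercase (s : String) (out : Int) : Prop := out = split_by_uppercase_alt s
instance (s : String) (out : Int) : Decidable (Spec_split_by_uppercase s out) := by unfold Spec_split_by_uppercase; infer_instance

-- ===== CLAIM (what is proved, stated in full; the proofs are below) =====
def Claim_equal_split_by_uppercase : Prop := ∀ (s : String), Dom_split_by_uppercase s → Spec_split_by_uppercase s (split_by_uppercase s)

-- ===== LEMMAS AND PROOFS =====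

-- A's loop appends one slice per uppercase position: the result list's length is the count.
theorem pv_foldl_len (cs : List Char) (l : List Int) (res : List (List Char)) (start : Int) :
    (l.foldl
      (fun (st : List (List Char) × Int) i =>
        if PySem.Chars.isupper (PySem.List.pyGetD cs i ' ')
        then (st.1 ++ [PySem.List.slice cs (some st.2) (some i)], i)
        else st) (res, start)).1.length
      = res.length + l.countP (fun i => PySem.Chars.isupper (PySem.List.pyGetD cs i ' ')) := by
  induction l generalizing res start with
  | nil => simp
  | cons a t ih =>
    by_cases h : PySem.Chars.isupper (PySem.List.pyGetD cs a ' ')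
    · simp [List.foldl_cons, h, ih]; omega
    · simp [List.foldl_cons, h, ih]

-- ===== VERDICT (by name: the statement is the Claim_ definition above) =====
theorem split_by_uppercase_spec : Claim_equal_split_by_uppercase := by
  intro s _
  unfold Spec_split_by_uppercase split_by_uppercase split_by_uppercase_alt
  have h := pv_foldl_len s.toList (PySem.List.pyRange 1 (PySem.Str.len s) 1) [] 0
  have hmap : (PySem.List.pyRange 1 (PySem.Str.len s) 1).map
      (fun j => PySem.List.pyGetD s.toList j ' ') = s.toList.drop 1 := by
    simpa [PySem.Str.len] using
      PySem.List.map_pyGetD_pyRange' (xs := s.toList) (d := ' ') (a := 1) (by norm_num)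
  have hcount : (PySem.List.pyRange 1 (PySem.Str.len s) 1).countP
      (fun i => PySem.Chars.isupper (PySem.List.pyGetD s.toList i ' '))
      = (s.toList.drop 1).countP PySem.Chars.isupper := by
    rw [← hmap, List.countP_map]; rfl
  simp only [List.length_append, List.length_cons, List.length_nil, hcount] at h ⊢
  rw [h]
  push_cast
  ring
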